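-- pv_equiv track=rewrite | github.com/zaqNatsuki/Python | homework/hw31.py | check
-- ===== SOURCE A (Python) =====
-- def check(s):
--     if('0'<=s[0]<='9'):
--         for i in s:
--             if(not('0'<=i<='9')):
--                 return 'Invalid ';
--         return 'Number ';
--     elif('a'<=s[0]<='z' or 'A'<=s[0]<='Z' or s[0]=='_'):
--         for i in s:
--             if(not('a'<=i<='z' or 'A'<=i<='Z' or i=='_' or '0'<=i<='9')):
--                 return 'Invalid ';
--         return 'Identifier ';
--     else:
--         return 'Invalid ';
-- ===== SOURCE B (Python) =====
-- # Table-driven DFA: one fold over the string, no branch on the first character.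
-- def _cls(c):
--     if '0' <= c <= '9':
--         return 'd'
--     if 'a' <= c <= 'z' or 'A' <= c <= 'Z' or c == '_':
--         return 'l'
--     return 'o'
--
-- _TRANS = {
--     ('S', 'd'): 'N', ('S', 'l'): 'I', ('S', 'o'): 'B',
--     ('N', 'd'): 'N', ('N', 'l'): 'B', ('N', 'o'): 'B',
--     ('I', 'd'): 'I', ('I', 'l'): 'I', ('I', 'o'): 'B',
--     ('B', 'd'): 'B', ('B', 'l'): 'B', ('B', 'o'): 'B',
-- }
-- _OUT = {'N': 'Number ', 'I': 'Identifier '}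
--
-- def check(s):
--     state = 'S'
--     for c in s:
--         state = _TRANS[(state, _cls(c))]
--     return _OUT.get(state, 'Invalid ')
-- ===== Notes on version B (the rewrite author's own statement) =====
-- stated objective: alternative
-- what changed: Replaces A's branch-on-first-char plus two range-check loops with a single table-driven DFA fold: a 4-state transition table consumed once over the string, then the final state is mapped to the result.
-- outside the precondition, e.g. on check(''): A raises IndexError, B returns 'Invalid '
import Mathlib
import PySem

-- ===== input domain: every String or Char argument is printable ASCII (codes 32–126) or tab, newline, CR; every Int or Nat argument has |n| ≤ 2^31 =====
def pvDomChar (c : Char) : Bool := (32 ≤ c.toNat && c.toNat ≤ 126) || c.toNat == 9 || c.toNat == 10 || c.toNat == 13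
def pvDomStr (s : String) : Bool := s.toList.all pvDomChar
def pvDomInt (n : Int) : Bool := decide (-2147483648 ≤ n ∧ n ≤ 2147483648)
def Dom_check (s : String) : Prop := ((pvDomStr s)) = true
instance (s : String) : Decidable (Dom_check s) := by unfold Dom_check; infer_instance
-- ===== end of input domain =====

-- B replaces A's branch-on-first-char plus two range-check loops by a single table-driven
-- DFA fold over the string (objective: alternative algorithm, same cost).

-- ===== PORT A =====
def pvNumLoop : List Char → String
  | [] => "Number "
  | i :: rest => if ¬('0' ≤ i ∧ i ≤ '9') then "Invalid " else pvNumLoop rest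

def pvIdLoop : List Char → String
  | [] => "Identifier "
  | i :: rest =>
    if ¬(('a' ≤ i ∧ i ≤ 'z') ∨ ('A' ≤ i ∧ i ≤ 'Z') ∨ i = '_' ∨ ('0' ≤ i ∧ i ≤ '9')) then
      "Invalid "
    else pvIdLoop rest

def check (s : String) : String :=
  match PySem.Str.pyGet? s 0 with
  | none => ""   -- s[0] raises IndexError on the empty string; excluded by Pre_check
  | some c0 =>
    if '0' ≤ c0 ∧ c0 ≤ '9' then pvNumLoop s.toList
    else if ('a' ≤ c0 ∧ c0 ≤ 'z') ∨ ('A' ≤ c0 ∧ c0 ≤ 'Z') ∨ c0 = '_' then pvIdLoop s.toList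
    else "Invalid "

-- ===== PORT B =====
-- character classes: 'd' ↦ 0, 'l' ↦ 1, 'o' ↦ 2 (Source B's _cls)
def pvCls (c : Char) : Nat :=
  if '0' ≤ c ∧ c ≤ '9' then 0
  else if ('a' ≤ c ∧ c ≤ 'z') ∨ ('A' ≤ c ∧ c ≤ 'Z') ∨ c = '_' then 1
  else 2

-- states: 'S' ↦ 0, 'N' ↦ 1, 'I' ↦ 2, 'B' ↦ 3 (Source B's _TRANS table)
def pvTrans (st : Nat) (cl : Nat) : Nat :=
  match st, cl with
  | 0, 0 => 1 | 0, 1 => 2 | 0, _ => 3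
  | 1, 0 => 1 | 1, _ => 3
  | 2, 0 => 2 | 2, 1 => 2 | 2, _ => 3
  | _, _ => 3

def check_alt (s : String) : String :=
  let fin := s.toList.foldl (fun st c => pvTrans st (pvCls c)) 0
  if fin = 1 then "Number " else if fin = 2 then "Identifier " else "Invalid "

-- ===== PRECONDITION & SPEC =====
-- Pre_check excludes only the empty string, on which A raises IndexError at s[0].
def Pre_check (s : String) : Prop := s.toList ≠ []
instance (s : String) : Decidable (Pre_check s) := by unfold Pre_check; infer_instance
def pvWitness_check : String := "a1"

def Spec_check (s : String) (out : String) : Prop := out = check_alt s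
instance (s : String) (out : String) : Decidable (Spec_check s out) := by unfold Spec_check; infer_instance

-- ===== CLAIM (what is proved, stated in full; the proofs are below) =====
def Claim_equal_check : Prop := ∀ (s : String), Dom_check s → Pre_check s → Spec_check s (check s)

-- ===== LEMMAS AND PROOFS =====
lemma fold_bad (l : List Char) :
    l.foldl (fun st c => pvTrans st (pvCls c)) 3 = 3 := by
  induction l with
  | nil => rfl
  | cons c rest ih =>
    rw [List.foldl_cons]
    have ht : pvTrans 3 (pvCls c) = 3 := by unfold pvTrans pvCls; split_ifs <;> rfl
    rw [ht]; exact ih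

lemma cls_of_digit {c : Char} (h : '0' ≤ c ∧ c ≤ '9') : pvCls c = 0 := by
  simp [pvCls, h]

lemma cls_not_digit {c : Char} (h : ¬('0' ≤ c ∧ c ≤ '9')) :
    pvCls c = 1 ∨ pvCls c = 2 := by
  unfold pvCls
  rw [if_neg h]
  by_cases h2 : ('a' ≤ c ∧ c ≤ 'z') ∨ ('A' ≤ c ∧ c ≤ 'Z') ∨ c = '_'
  · rw [if_pos h2]; exact Or.inl rfl
  · rw [if_neg h2]; exact Or.inr rfl

lemma cls_of_idchar {c : Char}
    (h : ('a' ≤ c ∧ c ≤ 'z') ∨ ('A' ≤ c ∧ c ≤ 'Z') ∨ c = '_' ∨ ('0' ≤ c ∧ c ≤ '9')) :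
    pvCls c = 0 ∨ pvCls c = 1 := by
  unfold pvCls
  by_cases h1 : '0' ≤ c ∧ c ≤ '9'
  · rw [if_pos h1]; exact Or.inl rfl
  · rw [if_neg h1, if_pos (by tauto : ('a' ≤ c ∧ c ≤ 'z') ∨ ('A' ≤ c ∧ c ≤ 'Z') ∨ c = '_')]
    exact Or.inr rfl

lemma cls_of_other {c : Char}
    (h : ¬(('a' ≤ c ∧ c ≤ 'z') ∨ ('A' ≤ c ∧ c ≤ 'Z') ∨ c = '_' ∨ ('0' ≤ c ∧ c ≤ '9'))) :
    pvCls c = 2 := by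
  unfold pvCls
  rw [if_neg (fun hd => h (Or.inr (Or.inr (Or.inr hd)))),
    if_neg (fun hl => h (by tauto : _))]

lemma fold_num (l : List Char) :
    l.foldl (fun st c => pvTrans st (pvCls c)) 1 =
      if l.all (fun c => decide ('0' ≤ c ∧ c ≤ '9')) then 1 else 3 := by
  induction l with
  | nil => rfl
  | cons c rest ih =>
    rw [List.foldl_cons]
    by_cases h : '0' ≤ c ∧ c ≤ '9'
    · rw [cls_of_digit h, show pvTrans 1 0 = 1 from rfl, ih]
      simp [h]
    · have ht : pvTrans 1 (pvCls c) = 3 := by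
        rcases cls_not_digit h with hc | hc <;> rw [hc] <;> rfl
      rw [ht, fold_bad]
      simp [h]

lemma fold_id (l : List Char) :
    l.foldl (fun st c => pvTrans st (pvCls c)) 2 =
      if l.all (fun c =>
          decide (('a' ≤ c ∧ c ≤ 'z') ∨ ('A' ≤ c ∧ c ≤ 'Z') ∨ c = '_' ∨ ('0' ≤ c ∧ c ≤ '9')))
      then 2 else 3 := by
  induction l with
  | nil => rfl
  | cons c rest ih =>
    rw [List.foldl_cons]
    by_cases h : ('a' ≤ c ∧ c ≤ 'z') ∨ ('A' ≤ c ∧ c ≤ 'Z') ∨ c = '_' ∨ ('0' ≤ c ∧ c ≤ '9')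
    · have ht : pvTrans 2 (pvCls c) = 2 := by
        rcases cls_of_idchar h with hc | hc <;> rw [hc] <;> rfl
      rw [ht, ih]
      simp [h]
    · rw [cls_of_other h, show pvTrans 2 2 = 3 from rfl, fold_bad]
      simp [h]

lemma numLoop_eq (l : List Char) :
    pvNumLoop l = if l.all (fun c => decide ('0' ≤ c ∧ c ≤ '9')) then "Number " else "Invalid " := by
  induction l with
  | nil => rfl
  | cons c rest ih =>
    by_cases h : '0' ≤ c ∧ c ≤ '9' <;> simp [pvNumLoop, h, ih]

lemma idLoop_eq (l : List Char) :
    pvIdLoop l =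
      if l.all (fun c =>
          decide (('a' ≤ c ∧ c ≤ 'z') ∨ ('A' ≤ c ∧ c ≤ 'Z') ∨ c = '_' ∨ ('0' ≤ c ∧ c ≤ '9')))
      then "Identifier " else "Invalid " := by
  induction l with
  | nil => rfl
  | cons c rest ih =>
    by_cases h : ('a' ≤ c ∧ c ≤ 'z') ∨ ('A' ≤ c ∧ c ≤ 'Z') ∨ c = '_' ∨ ('0' ≤ c ∧ c ≤ '9') <;>
      simp [pvIdLoop, h, ih]

-- ===== VERDICT (by name: the statement is the Claim_ definition above) =====
theorem check_spec : Claim_equal_check := by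
  intro s _ hpre
  unfold Spec_check check check_alt
  obtain ⟨c, rest, hl⟩ : ∃ c rest, s.toList = c :: rest := by
    cases h : s.toList with
    | nil => exact absurd h hpre
    | cons a b => exact ⟨a, b, rfl⟩
  have hget : PySem.Str.pyGet? s 0 = some c := by simp [hl]
  rw [hget, hl]
  dsimp only
  rw [List.foldl_cons]
  by_cases h1 : '0' ≤ c ∧ c ≤ '9'
  · rw [if_pos h1, numLoop_eq, cls_of_digit h1, show pvTrans 0 0 = 1 from rfl, fold_num]
    have hall : ((c :: rest).all fun c => decide ('0' ≤ c ∧ c ≤ '9'))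
        = (rest.all fun c => decide ('0' ≤ c ∧ c ≤ '9')) := by simp [h1]
    rw [hall]
    by_cases hr : (rest.all fun c => decide ('0' ≤ c ∧ c ≤ '9')) = true
    · rw [if_pos hr, if_pos hr]; norm_num
    · rw [if_neg hr, if_neg hr]; norm_num
  · by_cases h2 : ('a' ≤ c ∧ c ≤ 'z') ∨ ('A' ≤ c ∧ c ≤ 'Z') ∨ c = '_'
    · have hcid : ('a' ≤ c ∧ c ≤ 'z') ∨ ('A' ≤ c ∧ c ≤ 'Z') ∨ c = '_' ∨ ('0' ≤ c ∧ c ≤ '9') := by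
        tauto
      have hc : pvCls c = 1 := by
        unfold pvCls
        rw [if_neg h1, if_pos h2]
      rw [if_neg h1, if_pos h2, idLoop_eq, hc, show pvTrans 0 1 = 2 from rfl, fold_id]
      have hall : ((c :: rest).all fun c =>
            decide (('a' ≤ c ∧ c ≤ 'z') ∨ ('A' ≤ c ∧ c ≤ 'Z') ∨ c = '_' ∨ ('0' ≤ c ∧ c ≤ '9')))
          = (rest.all fun c =>
            decide (('a' ≤ c ∧ c ≤ 'z') ∨ ('A' ≤ c ∧ c ≤ 'Z') ∨ c = '_' ∨ ('0' ≤ c ∧ c ≤ '9'))) := by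
        simp [hcid]
      rw [hall]
      by_cases hr : (rest.all fun c =>
          decide (('a' ≤ c ∧ c ≤ 'z') ∨ ('A' ≤ c ∧ c ≤ 'Z') ∨ c = '_' ∨ ('0' ≤ c ∧ c ≤ '9'))) = true
      · rw [if_pos hr, if_pos hr]; norm_num
      · rw [if_neg hr, if_neg hr]; norm_num
    · have hc : pvCls c = 2 := cls_of_other (by tauto)
      rw [if_neg h1, if_neg h2, hc, show pvTrans 0 2 = 3 from rfl, fold_bad]
      rfl
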